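-- pv_equiv track=rewrite | github.com/frannymcwilliams/CSCI1300 | Homework9_McWilliams.py | countNames
-- ===== SOURCE A (Python) =====
-- def countNames(name_list):
--     dictionary = {} # dictionary
--     for names in name_list: # for loop
--         name = names.split() # split the names at that point in name_list
--         if len(name) < 2: # if it is empty
--             continue # go through the loop and do nothing
--         if name[0] not in dictionary.keys(): # if the name doesnt match a key
--             dictionary[name[0]] = [name[1]] # set that to a new one
--         else: # else
--             dictionary[name[0]].append(name[1]) # add that name to the key
--     return dictionary # return dictionary
-- ===== SOURCE B (Python) =====
-- def countNames(name_list):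
--     pairs = []
--     for entry in name_list:
--         parts = entry.split()
--         if len(parts) >= 2:
--             pairs.append((parts[0], parts[1]))
--     return {first: [s for f, s in pairs if f == first]
--             for first in dict.fromkeys(f for f, _ in pairs)}
-- ===== Notes on version B (the rewrite author's own statement) =====
-- stated objective: alternative
-- what changed: Replaces A's single-pass incremental dict construction (insert-or-append per entry) with a two-phase pipeline: first collect all (first, second) pairs, then build the result by mapping each distinct first name (in first-appearance order) to a filter of the pair list.
import Mathlib
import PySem

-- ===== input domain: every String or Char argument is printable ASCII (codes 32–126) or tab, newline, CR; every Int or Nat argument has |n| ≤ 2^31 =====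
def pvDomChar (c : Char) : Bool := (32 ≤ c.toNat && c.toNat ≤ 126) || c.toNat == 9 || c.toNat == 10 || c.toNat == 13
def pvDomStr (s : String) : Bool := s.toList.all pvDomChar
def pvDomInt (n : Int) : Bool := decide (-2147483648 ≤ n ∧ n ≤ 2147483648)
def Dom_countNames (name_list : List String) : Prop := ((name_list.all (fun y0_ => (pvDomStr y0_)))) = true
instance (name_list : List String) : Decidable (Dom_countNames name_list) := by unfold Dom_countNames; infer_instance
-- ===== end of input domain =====

-- B replaces A's one-pass insert-or-append dict construction by a two-phase pipeline
-- (collect pairs, then map each distinct first name to a filter of the pair list); objective: alternative.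

-- ===== PORT A =====
-- A: one pass, growing a dict; new key -> singleton list, known key -> append in place.
def countNames (name_list : List String) : List (String × List String) :=
  (name_list.foldl
    (fun (dictionary : PySem.Dict String (List String)) names =>
      let name := PySem.Str.split₀ names
      if name.length < 2 then dictionary
      else if dictionary.keys.contains (PySem.List.pyGetD name 0 "") = false then
        dictionary.insert (PySem.List.pyGetD name 0 "") [PySem.List.pyGetD name 1 ""]
      else
        dictionary.modify (PySem.List.pyGetD name 0 "") [] (fun l => l ++ [PySem.List.pyGetD name 1 ""]))
    PySem.Dict.empty).items

-- ===== PORT B =====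
-- B: collect (first, second) pairs, then for each distinct first name (first-appearance order,
-- dict.fromkeys = PySem.List.dedup) the comprehension [s for f, s in pairs if f == first].
def countNames_alt (name_list : List String) : List (String × List String) :=
  let pairs := name_list.foldl
    (fun (acc : List (String × String)) entry =>
      let parts := PySem.Str.split₀ entry
      if 2 ≤ parts.length then
        acc ++ [(PySem.List.pyGetD parts 0 "", PySem.List.pyGetD parts 1 "")]
      else acc) []
  (PySem.List.dedup (pairs.map (fun p => p.1))).map
    (fun first => (first, (pairs.filter (fun p => p.1 == first)).map (fun p => p.2)))

-- ===== PRECONDITION & SPEC =====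
def Spec_countNames (name_list : List String) (out : List (String × List String)) : Prop := out = countNames_alt name_list
instance (name_list : List String) (out : List (String × List String)) : Decidable (Spec_countNames name_list out) := by unfold Spec_countNames; infer_instance

-- ===== CLAIM (what is proved, stated in full; the proofs are below) =====
def Claim_equal_countNames : Prop := ∀ (name_list : List String), Dom_countNames name_list → Spec_countNames name_list (countNames name_list)

-- ===== LEMMAS AND PROOFS =====

-- the pair list B builds, as filter + map
def pvPairs (name_list : List String) : List (String × String) :=
  (name_list.filter (fun entry => 2 ≤ (PySem.Str.split₀ entry).length)).map
    (fun entry => (PySem.List.pyGetD (PySem.Str.split₀ entry) 0 "",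
                   PySem.List.pyGetD (PySem.Str.split₀ entry) 1 ""))

lemma pvPairs_eq (name_list : List String) :
    (name_list.foldl
      (fun (acc : List (String × String)) entry =>
        let parts := PySem.Str.split₀ entry
        if 2 ≤ parts.length then
          acc ++ [(PySem.List.pyGetD parts 0 "", PySem.List.pyGetD parts 1 "")]
        else acc) []) = pvPairs name_list := by
  have := PySem.List.foldl_append_if
      (fun entry => decide (2 ≤ (PySem.Str.split₀ entry).length))
      (fun entry => (PySem.List.pyGetD (PySem.Str.split₀ entry) 0 "",
                     PySem.List.pyGetD (PySem.Str.split₀ entry) 1 ""))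
      name_list []
  simpa [pvPairs] using this

-- A's branch collapses to a single Dict.modify
lemma pvStep_eq (d : PySem.Dict String (List String)) (k v : String) :
    (if d.keys.contains k = false then d.insert k [v]
     else d.modify k [] (fun l => l ++ [v])) = d.modify k [] (fun l => l ++ [v]) := by
  by_cases h : d.keys.contains k = false
  · have hc : d.contains k = false := by
      rw [PySem.Dict.contains_eq_decide_mem_keys]
      simpa using h
    rw [if_pos h]
    simp only [PySem.Dict.modify, PySem.Dict.getD_of_not_contains d [] hc, List.nil_append]
  · rw [if_neg]
    simpa using h

-- A's loop body, with the branch collapsed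
lemma pvStepFun_eq :
    (fun (dictionary : PySem.Dict String (List String)) names =>
      let name := PySem.Str.split₀ names
      if name.length < 2 then dictionary
      else if dictionary.keys.contains (PySem.List.pyGetD name 0 "") = false then
        dictionary.insert (PySem.List.pyGetD name 0 "") [PySem.List.pyGetD name 1 ""]
      else
        dictionary.modify (PySem.List.pyGetD name 0 "") [] (fun l => l ++ [PySem.List.pyGetD name 1 ""])) =
    (fun (dictionary : PySem.Dict String (List String)) names =>
      if (PySem.Str.split₀ names).length < 2 then dictionary
      else
        dictionary.modify (PySem.List.pyGetD (PySem.Str.split₀ names) 0 "") []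
          (fun l => l ++ [PySem.List.pyGetD (PySem.Str.split₀ names) 1 ""])) := by
  funext d names
  by_cases h : (PySem.Str.split₀ names).length < 2
  · simp [h]
  · simp only [h, if_false]
    exact pvStep_eq d _ _

-- A's whole fold is the modify-fold over the pair list
lemma pvFold_eq (name_list : List String) (d : PySem.Dict String (List String)) :
    (name_list.foldl
      (fun (dictionary : PySem.Dict String (List String)) names =>
        if (PySem.Str.split₀ names).length < 2 then dictionary
        else
          dictionary.modify (PySem.List.pyGetD (PySem.Str.split₀ names) 0 "") []
            (fun l => l ++ [PySem.List.pyGetD (PySem.Str.split₀ names) 1 ""]))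
      d) =
    (pvPairs name_list).foldl (fun d p => d.modify p.1 [] (fun l => l ++ [p.2])) d := by
  induction name_list generalizing d with
  | nil => simp [pvPairs]
  | cons x xs ih =>
    simp only [List.foldl_cons]
    by_cases h : 2 ≤ (PySem.Str.split₀ x).length
    · have hlt : ¬ (PySem.Str.split₀ x).length < 2 := by omega
      simp only [hlt, if_false]
      rw [ih]
      simp [pvPairs, h]
    · have hlt : (PySem.Str.split₀ x).length < 2 := by omega
      simp only [hlt, if_true]
      rw [ih]
      simp [pvPairs, h]

-- ===== VERDICT (by name: the statement is the Claim_ definition above) =====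
theorem countNames_spec : Claim_equal_countNames := by
  intro name_list _
  show countNames name_list = countNames_alt name_list
  unfold countNames countNames_alt
  rw [pvPairs_eq, pvStepFun_eq, pvFold_eq]
  set ps := pvPairs name_list with hps
  have hnd : ((ps.foldl (fun d p => d.modify p.1 [] (fun l => l ++ [p.2])) PySem.Dict.empty)).keys.Nodup := by
    exact PySem.Dict.nodup_keys_foldl_modify_key ps (fun p => p.1) [] (fun d p l => l ++ [p.2]) _ (by simp)
  rw [PySem.Dict.items_eq_map_keys _ hnd []]
  rw [PySem.Dict.keys_foldl_modify_key ps (fun p => p.1) [] (fun d p l => l ++ [p.2])]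
  rw [PySem.Dict.keys_empty, PySem.Set.update_nil_left, ← PySem.List.dedup_eq_ofList]
  apply List.map_congr_left
  intro k _
  rw [PySem.Dict.getD_foldl_modify_append]
  simp
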